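-- pv_equiv track=rewrite | github.com/Eclypsee/CSC-101-Labs | lab8/detective.py | can_make_note_out_of_magazine
-- ===== SOURCE A (Python) =====
-- def can_make_note_out_of_magazine(r:str, m:str)->bool:
--     if len(r)>0 and len(m)>0:
--         rls = []
--         for el in r:
--             if not el == " ":
--                 rls.append(el)
--         mls = []
--         for el in m:
--             if not el == " ":
--                 mls.append(el)
--         for i in range(len(rls)):
--             found = False
--             for j in range(len(mls)):
--                 if rls[i]==mls[j]:
--                     mls[j] = -1
--                     found = True
--                     break # out of inner loop
--             if not found == True:
--                 return False
--         return True
--     else: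
--         return False
-- ===== SOURCE B (Python) =====
-- def can_make_note_out_of_magazine(r: str, m: str) -> bool:
--     if not r or not m:
--         return False
--     counts = {}
--     for c in m:
--         if c != " ":
--             counts[c] = counts.get(c, 0) + 1
--     for c in r:
--         if c != " ":
--             k = counts.get(c, 0)
--             if k == 0:
--                 return False
--             counts[c] = k - 1
--     return True
-- ===== Notes on version B (the rewrite author's own statement) =====
-- stated objective: faster
-- what changed: Replaces the per-letter linear scan-and-mark over the magazine list with a single counting pass that builds a dict of letter counts and then decrements it once per note letter.
import Mathlib
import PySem

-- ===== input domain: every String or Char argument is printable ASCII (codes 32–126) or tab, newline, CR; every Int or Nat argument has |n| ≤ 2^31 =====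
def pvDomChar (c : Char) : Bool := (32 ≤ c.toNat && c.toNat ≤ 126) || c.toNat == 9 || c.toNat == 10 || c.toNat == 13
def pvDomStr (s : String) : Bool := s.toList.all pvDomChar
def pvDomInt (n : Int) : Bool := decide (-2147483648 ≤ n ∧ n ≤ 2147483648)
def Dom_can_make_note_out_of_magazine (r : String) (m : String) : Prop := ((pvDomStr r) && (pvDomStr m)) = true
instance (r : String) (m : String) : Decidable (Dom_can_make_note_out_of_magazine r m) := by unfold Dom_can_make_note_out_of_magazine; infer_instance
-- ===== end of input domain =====

-- B replaces A's per-note-letter linear scan-and-mark over the magazine list (O(n*m)) with one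
-- counting dict built in a single pass over the magazine and decremented per note letter (O(n+m)).

-- ===== PORT A =====
-- Inner loop `for j in range(len(mls)): if rls[i]==mls[j]: mls[j] = -1; found = True; break`:
-- scan for the first unmarked slot equal to c and mark it. Python marks with the int -1; since a
-- character from r never equals the int -1, a marked slot is represented exactly by `none`.
def pvMarkFirst (c : Char) : List (Option Char) → Option (List (Option Char))
  | [] => none
  | x :: xs => if x = some c then some (none :: xs)
               else (pvMarkFirst c xs).map (x :: ·)

-- Outer loop `for i in range(len(rls))`: early `return False` when no match was found.
def pvOuterA : List Char → List (Option Char) → Bool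
  | [], _ => true
  | c :: cs, mls =>
    match pvMarkFirst c mls with
    | none => false
    | some mls' => pvOuterA cs mls'

def can_make_note_out_of_magazine (r : String) (m : String) : Bool :=
  if PySem.Str.len r > 0 ∧ PySem.Str.len m > 0 then
    let rls := r.toList.foldl (fun acc el => if ¬ (el = ' ') then acc ++ [el] else acc) ([] : List Char)
    let mls := (m.toList.foldl (fun acc el => if ¬ (el = ' ') then acc ++ [el] else acc) ([] : List Char)).map some
    pvOuterA rls mls
  else false

-- ===== PORT B =====
-- Second loop of Source B: `for c in r: if c != " ": k = counts.get(c, 0); if k == 0: return False; counts[c] = k - 1`.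
def pvGoB : List Char → PySem.Dict Char Int → Bool
  | [], _ => true
  | c :: cs, d =>
    if c = ' ' then pvGoB cs d
    else
      let k := d.getD c 0
      if k = 0 then false else pvGoB cs (d.insert c (k - 1))

def can_make_note_out_of_magazine_alt (r : String) (m : String) : Bool :=
  if r.toList = [] ∨ m.toList = [] then false
  else
    let counts := m.toList.foldl
      (fun d c => if ¬ (c = ' ') then d.insert c (d.getD c 0 + 1) else d) PySem.Dict.empty
    pvGoB r.toList counts

-- ===== PRECONDITION & SPEC =====
def Spec_can_make_note_out_of_magazine (r : String) (m : String) (out : Bool) : Prop := out = can_make_note_out_of_magazine_alt r m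
instance (r : String) (m : String) (out : Bool) : Decidable (Spec_can_make_note_out_of_magazine r m out) := by unfold Spec_can_make_note_out_of_magazine; infer_instance

-- ===== CLAIM (what is proved, stated in full; the proofs are below) =====
def Claim_equal_can_make_note_out_of_magazine : Prop := ∀ (r : String) (m : String), Dom_can_make_note_out_of_magazine r m → Spec_can_make_note_out_of_magazine r m (can_make_note_out_of_magazine r m)

-- ===== LEMMAS AND PROOFS =====

lemma pvMarkFirst_none_iff (c : Char) (mls : List (Option Char)) :
    pvMarkFirst c mls = none ↔ c ∉ mls.filterMap id := by
  induction mls with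
  | nil => simp [pvMarkFirst]
  | cons x xs ih =>
    by_cases hx : x = some c
    · subst hx; simp [pvMarkFirst]
    · cases x with
      | none => simpa [pvMarkFirst, hx, Option.map_eq_none_iff] using ih
      | some a =>
        have ha : c ≠ a := fun h => hx (by simp [h])
        rw [show List.filterMap id (some a :: xs) = a :: List.filterMap id xs from by simp]
        simp [pvMarkFirst, hx, Option.map_eq_none_iff, ih, ha]

lemma pvMarkFirst_some_avail (c : Char) (mls mls' : List (Option Char))
    (h : pvMarkFirst c mls = some mls') :
    mls'.filterMap id = (mls.filterMap id).erase c := by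
  induction mls generalizing mls' with
  | nil => simp [pvMarkFirst] at h
  | cons x xs ih =>
    by_cases hx : x = some c
    · subst hx
      simp [pvMarkFirst] at h
      subst h
      simp
    · simp only [pvMarkFirst, if_neg hx, Option.map_eq_some_iff] at h
      obtain ⟨ys, hys, rfl⟩ := h
      cases x with
      | none => simpa using ih ys hys
      | some a =>
        have ha : a ≠ c := fun h' => hx (by simp [h'])
        rw [show List.filterMap id (some a :: ys) = a :: List.filterMap id ys from by simp,
            show List.filterMap id (some a :: xs) = a :: List.filterMap id xs from by simp,
            ih ys hys, List.erase_cons_tail (by simp [ha])]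

lemma pvCountConsErase (c : Char) (cs avail : List Char) :
    (∀ x, (c :: cs).count x ≤ avail.count x) ↔
      (c ∈ avail ∧ ∀ x, cs.count x ≤ (avail.erase c).count x) := by
  constructor
  · intro h
    have hc : 0 < avail.count c := by
      have := h c
      rw [List.count_cons_self] at this
      omega
    refine ⟨List.count_pos_iff.mp hc, fun x => ?_⟩
    by_cases hxc : x = c
    · subst hxc
      rw [List.count_erase_self]
      have := h x
      rw [List.count_cons_self] at this
      omega
    · rw [List.count_erase_of_ne hxc]
      have := h x
      rw [List.count_cons_of_ne (Ne.symm hxc)] at this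
      exact this
  · rintro ⟨hc, h⟩ x
    by_cases hxc : x = c
    · subst hxc
      have := h x
      rw [List.count_erase_self] at this
      have hpos : 0 < avail.count x := List.count_pos_iff.mpr hc
      rw [List.count_cons_self]
      omega
    · have := h x
      rw [List.count_erase_of_ne hxc] at this
      rw [List.count_cons_of_ne (Ne.symm hxc)]
      exact this

lemma pvOuterA_iff (rls : List Char) (mls : List (Option Char)) :
    pvOuterA rls mls = true ↔ ∀ x, rls.count x ≤ (mls.filterMap id).count x := by
  induction rls generalizing mls with
  | nil => simp [pvOuterA]
  | cons c cs ih =>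
    cases h : pvMarkFirst c mls with
    | none =>
      have hc : c ∉ mls.filterMap id := (pvMarkFirst_none_iff c mls).mp h
      simp only [pvOuterA, h]
      constructor
      · intro h'; cases h'
      · intro h'
        have h0 : (mls.filterMap id).count c = 0 := List.count_eq_zero.mpr hc
        have := h' c
        rw [List.count_cons_self, h0] at this
        omega
    | some mls' =>
      have hc : c ∈ mls.filterMap id := by
        by_contra hc
        rw [← pvMarkFirst_none_iff] at hc
        simp [hc] at h
      simp only [pvOuterA, h]
      rw [ih mls', pvMarkFirst_some_avail c mls mls' h, pvCountConsErase]
      tauto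

lemma pvCountsGetD (l : List Char) (x : Char) :
    (l.foldl (fun d c => if ¬ (c = ' ') then d.insert c (d.getD c 0 + 1) else d)
        PySem.Dict.empty).getD x 0 = ((l.filter (· ≠ ' ')).count x : Int) := by
  have : (fun (d : PySem.Dict Char Int) c => if ¬ (c = ' ') then d.insert c (d.getD c 0 + 1) else d)
      = (fun d c => if (fun c => decide (c ≠ ' ')) c = true then d.insert c (d.getD c 0 + 1) else d) := by
    funext d c; simp [ne_eq]
  rw [this, ← List.foldl_filter, PySem.Dict.getD_foldl_insert_add_one, PySem.Dict.getD_empty]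
  simp

lemma pvGoB_iff (cs : List Char) (d : PySem.Dict Char Int) (f : Char → Nat)
    (hf : ∀ x, d.getD x 0 = (f x : Int)) :
    pvGoB cs d = true ↔ ∀ x, (cs.filter (· ≠ ' ')).count x ≤ f x := by
  induction cs generalizing d f with
  | nil => simp [pvGoB]
  | cons c cs ih =>
    by_cases hc : c = ' '
    · subst hc
      rw [show pvGoB (' ' :: cs) d = pvGoB cs d from by simp [pvGoB],
          show (' ' :: cs).filter (· ≠ ' ') = cs.filter (· ≠ ' ') from by simp]
      exact ih d f hf
    · have hfilter : (c :: cs).filter (· ≠ ' ') = c :: cs.filter (· ≠ ' ') := by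
        simp [hc]
      simp only [pvGoB, if_neg hc, hf c, hfilter]
      by_cases hz : f c = 0
      · have hz' : ((f c : Int) = 0) := by exact_mod_cast hz
        simp only [hz', if_pos trivial]
        constructor
        · intro h'; cases h'
        · intro h'
          have := h' c
          rw [List.count_cons_self] at this
          omega
      · have hz' : ¬ ((f c : Int) = 0) := by exact_mod_cast hz
        simp only [if_neg hz']
        have h1 : 1 ≤ f c := Nat.one_le_iff_ne_zero.mpr hz
        rw [ih (d.insert c ((f c : Int) - 1)) (fun x => if x = c then f c - 1 else f x)
            (by
              intro x
              rw [PySem.Dict.getD_insert]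
              by_cases hxc : x = c
              · simp [hxc]; omega
              · simp [hxc, hf x])]
        constructor
        · intro h' x
          by_cases hxc : x = c
          · subst hxc
            have := h' x
            rw [if_pos rfl] at this
            rw [List.count_cons_self]
            omega
          · have := h' x
            rw [if_neg hxc] at this
            rw [List.count_cons_of_ne (Ne.symm hxc)]
            exact this
        · intro h' x
          by_cases hxc : x = c
          · subst hxc
            have := h' x
            rw [List.count_cons_self] at this
            rw [if_pos rfl]
            omega
          · have := h' x
            rw [List.count_cons_of_ne (Ne.symm hxc)] at this
            rw [if_neg hxc]
            exact this

lemma pvFoldlAppendFilter (l : List Char) :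
    l.foldl (fun acc el => if ¬ (el = ' ') then acc ++ [el] else acc) ([] : List Char)
      = l.filter (· ≠ ' ') := by
  have : (fun (acc : List Char) el => if ¬ (el = ' ') then acc ++ [el] else acc)
      = (fun acc el => if (fun el => decide (el ≠ ' ')) el = true then acc ++ [id el] else acc) := by
    funext acc el; simp [ne_eq]
  rw [this, PySem.List.foldl_append_if]
  simp

-- ===== VERDICT (by name: the statement is the Claim_ definition above) =====
theorem can_make_note_out_of_magazine_spec : Claim_equal_can_make_note_out_of_magazine := by
  intro r m _
  unfold Spec_can_make_note_out_of_magazine can_make_note_out_of_magazine can_make_note_out_of_magazine_alt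
  by_cases hr : r.toList = []
  · simp [PySem.Str.len_eq, hr]
  · by_cases hm : m.toList = []
    · simp [PySem.Str.len_eq, hm]
    · have hrl : (0 : Int) < PySem.Str.len r := by
        rw [PySem.Str.len_eq]
        exact_mod_cast List.length_pos_iff.mpr hr
      have hml : (0 : Int) < PySem.Str.len m := by
        rw [PySem.Str.len_eq]
        exact_mod_cast List.length_pos_iff.mpr hm
      rw [if_pos ⟨hrl, hml⟩, if_neg (by simp [hr, hm])]
      have hA := pvOuterA_iff (r.toList.filter (· ≠ ' '))
        ((m.toList.filter (· ≠ ' ')).map some)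
      have hB := pvGoB_iff r.toList
        (m.toList.foldl (fun d c => if ¬ (c = ' ') then d.insert c (d.getD c 0 + 1) else d)
          PySem.Dict.empty)
        (fun x => (m.toList.filter (· ≠ ' ')).count x)
        (fun x => pvCountsGetD m.toList x)
      rw [pvFoldlAppendFilter, pvFoldlAppendFilter]
      rw [Bool.eq_iff_iff, hA, hB]
      simp [List.filterMap_map]
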